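-- pv_equiv track=rewrite | github.com/di35117/msme_env | world_generator.py | assign_msme_clusters
-- ===== SOURCE A (Python) =====
-- from typing import Any, Dict, List, Optional, Tuple
--
-- def assign_msme_clusters(account_ids: List[int]) -> Dict[int, Tuple[int, List[int]]]:
--     """
--     Group MSME accounts into geographic industry clusters.
--     ALIGNED: Groups directly match the SFT sector brackets.
--     """
--     clusters = {}
--
--     # 1. Auto Ancillary Cluster (1-6)
--     c1 = [acc for acc in account_ids if acc <= 6]
--     # 2. Textile Cluster (7-12)
--     c2 = [acc for acc in account_ids if 7 <= acc <= 12]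
--     # 3. Pharma Cluster (13-20)
--     c3 = [acc for acc in account_ids if acc >= 13]
--
--     for cluster_id, chunk in enumerate([c1, c2, c3]):
--         for acc_id in chunk:
--             clusters[acc_id] = (cluster_id, [x for x in chunk if x != acc_id])
--
--     return clusters
-- ===== SOURCE B (Python) =====
-- from typing import Dict, List, Tuple
--
--
-- def _cluster_of(acc: int) -> int:
--     return 0 if acc <= 6 else (1 if acc <= 12 else 2)
--
--
-- def assign_msme_clusters(account_ids: List[int]) -> Dict[int, Tuple[int, List[int]]]:
--     # Stable-sort the accounts by cluster key, then one scan that skips keys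
--     # already assigned; peers are read off the original list by the key predicate.
--     clusters = {}
--     for acc in sorted(account_ids, key=_cluster_of):
--         if acc not in clusters:
--             cid = _cluster_of(acc)
--             clusters[acc] = (cid, [x for x in account_ids
--                                    if _cluster_of(x) == cid and x != acc])
--     return clusters
-- ===== Notes on version B (the rewrite author's own statement) =====
-- stated objective: alternative
-- what changed: Instead of A's three range-filter scans feeding overwrite-inserts, B stable-sorts the accounts by a cluster-key function, scans once skipping keys already assigned (explicit dedup instead of dict overwrites), and computes each peer list directly from the original list by the key predicate instead of from a precomputed chunk.
import Mathlib
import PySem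

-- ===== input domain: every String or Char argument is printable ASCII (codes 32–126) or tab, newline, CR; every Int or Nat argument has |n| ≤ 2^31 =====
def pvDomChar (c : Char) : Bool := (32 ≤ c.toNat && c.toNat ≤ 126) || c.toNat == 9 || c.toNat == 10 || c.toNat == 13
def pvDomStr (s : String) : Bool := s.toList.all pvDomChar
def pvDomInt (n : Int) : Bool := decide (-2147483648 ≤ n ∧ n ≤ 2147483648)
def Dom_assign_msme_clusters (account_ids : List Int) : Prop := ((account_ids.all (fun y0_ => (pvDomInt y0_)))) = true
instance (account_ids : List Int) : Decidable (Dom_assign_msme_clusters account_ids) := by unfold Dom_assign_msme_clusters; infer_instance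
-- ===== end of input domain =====

-- B stable-sorts by a cluster-key function and scans once with explicit dedup; A filters three ranges and relies on dict overwrites (alternative decomposition, same cost).


-- ===== PORT A =====
def assign_msme_clusters (account_ids : List Int) : List (Int × Int × List Int) :=
  let c1 := account_ids.filter (fun acc => decide (acc ≤ 6))
  let c2 := account_ids.filter (fun acc => decide (7 ≤ acc ∧ acc ≤ 12))
  let c3 := account_ids.filter (fun acc => decide (13 ≤ acc))
  let clusters := (PySem.List.enumerate [c1, c2, c3]).foldl
    (fun d p => p.2.foldl
      (fun d acc_id => d.insert acc_id (p.1, p.2.filter (fun x => decide (x ≠ acc_id)))) d)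
    (PySem.Dict.empty : PySem.Dict Int (Int × List Int))
  clusters.items

-- ===== PORT B =====
def pvClusterOf (acc : Int) : Int := if acc ≤ 6 then 0 else if acc ≤ 12 then 1 else 2

def assign_msme_clusters_alt (account_ids : List Int) : List (Int × Int × List Int) :=
  let clusters := (PySem.List.sorted account_ids (fun a => pvClusterOf a)).foldl
    (fun (d : PySem.Dict Int (Int × List Int)) acc =>
      if d.contains acc then d
      else
        let cid := pvClusterOf acc
        d.insert acc (cid, account_ids.filter (fun x => decide (pvClusterOf x = cid) && decide (x ≠ acc))))
    PySem.Dict.empty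
  clusters.items

-- ===== PRECONDITION & SPEC =====
def Spec_assign_msme_clusters (account_ids : List Int) (out : List (Int × Int × List Int)) : Prop := out = assign_msme_clusters_alt account_ids
instance (account_ids : List Int) (out : List (Int × Int × List Int)) : Decidable (Spec_assign_msme_clusters account_ids out) := by unfold Spec_assign_msme_clusters; infer_instance

-- ===== CLAIM (what is proved, stated in full; the proofs are below) =====
def Claim_equal_assign_msme_clusters : Prop := ∀ (account_ids : List Int), Dom_assign_msme_clusters account_ids → Spec_assign_msme_clusters account_ids (assign_msme_clusters account_ids)

-- ===== LEMMAS AND PROOFS =====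

-- the common value written for key `acc` (derived from both programs' inserts)
def pvVal (account_ids : List Int) (acc : Int) : Int × List Int :=
  (pvClusterOf acc,
   account_ids.filter (fun x => decide (pvClusterOf x = pvClusterOf acc) && decide (x ≠ acc)))

theorem clusterOf_eq_zero (x : Int) : (pvClusterOf x = 0) ↔ x ≤ 6 := by
  unfold pvClusterOf; split_ifs <;> omega

theorem clusterOf_eq_one (x : Int) : (pvClusterOf x = 1) ↔ (7 ≤ x ∧ x ≤ 12) := by
  unfold pvClusterOf; split_ifs <;> omega

theorem clusterOf_eq_two (x : Int) : (pvClusterOf x = 2) ↔ 13 ≤ x := by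
  unfold pvClusterOf; split_ifs <;> omega

-- insertBy places x after the block P where x is not-before and in front of the block Q where it is
theorem insertBy_middle {α : Type} (before : α → α → Bool) (x : α) (P Q : List α)
    (hP : ∀ y ∈ P, before x y = false) (hQ : ∀ y ∈ Q, before x y = true) :
    PySem.List.insertBy before x (P ++ Q) = P ++ x :: Q := by
  induction P with
  | nil =>
    cases Q with
    | nil => simp [PySem.List.insertBy]
    | cons q qs => simp [PySem.List.insertBy, hQ q (by simp)]
  | cons p ps ih =>
    simp [PySem.List.insertBy, hP p (by simp)]
    exact ih (fun y hy => hP y (by simp [hy]))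

-- the stable sort by cluster key is exactly the three range filters in order
theorem sorted_clusters (l : List Int) :
    PySem.List.sorted l (fun a => pvClusterOf a) false
      = l.filter (fun x => decide (pvClusterOf x = 0))
        ++ l.filter (fun x => decide (pvClusterOf x = 1))
        ++ l.filter (fun x => decide (pvClusterOf x = 2)) := by
  rw [PySem.List.sorted_eq_foldl_insertBy]
  suffices h : ∀ (A B C : List Int),
      (∀ y ∈ A, pvClusterOf y = 0) → (∀ y ∈ B, pvClusterOf y = 1) → (∀ y ∈ C, pvClusterOf y = 2) →
      l.foldl (fun acc x => PySem.List.insertBy (fun a b => decide (pvClusterOf a < pvClusterOf b)) x acc) (A ++ B ++ C)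
        = (A ++ l.filter (fun x => decide (pvClusterOf x = 0)))
          ++ (B ++ l.filter (fun x => decide (pvClusterOf x = 1)))
          ++ (C ++ l.filter (fun x => decide (pvClusterOf x = 2))) by
    simpa using h [] [] [] (by simp) (by simp) (by simp)
  induction l with
  | nil => intro A B C _ _ _; simp
  | cons x t ih =>
    intro A B C hA hB hC
    have hcx : pvClusterOf x = 0 ∨ pvClusterOf x = 1 ∨ pvClusterOf x = 2 := by
      unfold pvClusterOf; split_ifs <;> simp
    simp only [List.foldl_cons, List.filter_cons]
    rcases hcx with h0 | h1 | h2
    · have hins : PySem.List.insertBy (fun a b => decide (pvClusterOf a < pvClusterOf b)) x (A ++ B ++ C)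
          = (A ++ [x]) ++ B ++ C := by
        rw [List.append_assoc, insertBy_middle _ _ A (B ++ C)
          (fun y hy => by simp [hA y hy, h0])
          (fun y hy => by
            rcases List.mem_append.mp hy with h | h
            · simp [hB y h, h0]
            · simp [hC y h, h0])]
        simp
      rw [hins, ih (A ++ [x]) B C
        (fun y hy => by
          rcases List.mem_append.mp hy with h | h
          · exact hA y h
          · cases List.mem_singleton.mp h; exact h0)
        hB hC]
      simp [h0]
    · have hins : PySem.List.insertBy (fun a b => decide (pvClusterOf a < pvClusterOf b)) x (A ++ B ++ C)
          = A ++ (B ++ [x]) ++ C := by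
        rw [insertBy_middle _ _ (A ++ B) C
          (fun y hy => by
            rcases List.mem_append.mp hy with h | h
            · simp [hA y h, h1]
            · simp [hB y h, h1])
          (fun y hy => by simp [hC y hy, h1])]
        simp
      rw [hins, ih A (B ++ [x]) C hA
        (fun y hy => by
          rcases List.mem_append.mp hy with h | h
          · exact hB y h
          · cases List.mem_singleton.mp h; exact h1)
        hC]
      simp [h1]
    · have hins : PySem.List.insertBy (fun a b => decide (pvClusterOf a < pvClusterOf b)) x (A ++ B ++ C)
          = A ++ B ++ (C ++ [x]) := by
        have := insertBy_middle (fun a b => decide (pvClusterOf a < pvClusterOf b)) x (A ++ B ++ C) []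
          (fun y hy => by
            rcases List.mem_append.mp hy with h | h
            · rcases List.mem_append.mp h with h3 | h3
              · simp [hA y h3, h2]
              · simp [hB y h3, h2]
            · simp [hC y h, h2])
          (by simp)
        simpa using this
      rw [hins, ih A B (C ++ [x]) hA hB
        (fun y hy => by
          rcases List.mem_append.mp hy with h | h
          · exact hC y h
          · cases List.mem_singleton.mp h; exact h2)]
      simp [h2]

-- overwrite-insert = skip-insert when every stored value is already the canonical one
theorem insert_self_of_get? {d : PySem.Dict Int (Int × List Int)} {k : Int} {v : Int × List Int}
    (hnd : d.keys.Nodup) (hv : d.get? k = some v) : d.insert k v = d := by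
  apply PySem.Dict.ext
  rw [PySem.Dict.items_insert_of_contains]
  · have hp : ∀ p ∈ d.items, (if p.1 == k then (k, v) else p) = id p := by
      intro p hp
      by_cases hk : p.1 = k
      · have hm : (p.1, p.2) ∈ d.items := by simpa using hp
        have hg := PySem.Dict.get?_of_mem_items d hm hnd
        rw [hk, hv] at hg
        have hpv : v = p.2 := by injection hg
        simp [hk, hpv, Prod.ext_iff]
      · simp [hk]
    rw [List.map_congr_left hp, List.map_id]
  · rw [PySem.Dict.contains_eq_isSome_get?, hv]; rfl

theorem foldl_insert_eq_skip (l : List Int) (V : Int → Int × List Int)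
    (d : PySem.Dict Int (Int × List Int)) (hnd : d.keys.Nodup)
    (hinv : ∀ k v, d.get? k = some v → v = V k) :
    l.foldl (fun d k => d.insert k (V k)) d
      = l.foldl (fun d k => if d.contains k then d else d.insert k (V k)) d := by
  induction l generalizing d with
  | nil => rfl
  | cons k t ih =>
    simp only [List.foldl_cons]
    by_cases hc : d.contains k = true
    · have hg : ∃ v, d.get? k = some v := by
        rw [PySem.Dict.contains_eq_isSome_get?] at hc
        exact Option.isSome_iff_exists.mp hc
      obtain ⟨v, hv⟩ := hg
      have hvV : v = V k := hinv k v hv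
      rw [if_pos hc, insert_self_of_get? hnd (hvV ▸ hv)]
      exact ih d hnd hinv
    · rw [if_neg hc]
      apply ih
      · exact PySem.Dict.nodup_keys_insert _ _ _ hnd
      · intro k' v' hv'
        rw [PySem.Dict.get?_insert] at hv'
        split_ifs at hv' with h
        · exact (Option.some.injEq _ _).mp hv' |>.symm.trans (by rw [h])
        · exact hinv k' v' hv'

theorem foldl_congr_mem' {α β : Type} (l : List α) (f g : β → α → β) (b : β)
    (h : ∀ b' a, a ∈ l → f b' a = g b' a) : l.foldl f b = l.foldl g b := by
  induction l generalizing b with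
  | nil => rfl
  | cons x t ih =>
    simp only [List.foldl_cons]
    rw [h b x (by simp)]
    exact ih _ (fun b' a ha => h b' a (by simp [ha]))

-- one chunk of A's loop, rewritten to the canonical value function
theorem chunk_fold (l : List Int) (i : Int) (p : Int → Bool)
    (hp : ∀ x, (pvClusterOf x = i) ↔ p x = true) (d : PySem.Dict Int (Int × List Int)) :
    (l.filter p).foldl
        (fun d acc => d.insert acc (i, (l.filter p).filter (fun x => decide (x ≠ acc)))) d
      = (l.filter (fun x => decide (pvClusterOf x = i))).foldl
          (fun d acc => d.insert acc (pvVal l acc)) d := by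
  have hfp : l.filter p = l.filter (fun x => decide (pvClusterOf x = i)) := by
    apply List.filter_congr
    intro x _
    have := hp x
    cases hpb : p x <;> simp_all
  rw [hfp]
  apply foldl_congr_mem'
  intro d' acc hacc
  have hci : pvClusterOf acc = i := by
    have := (List.mem_filter.mp hacc).2
    simpa using this
  unfold pvVal
  rw [hci, List.filter_filter]
  have hcomm : (fun a => decide (a ≠ acc) && decide (pvClusterOf a = i))
      = fun x => decide (pvClusterOf x = i) && decide (x ≠ acc) := by
    funext a; rw [Bool.and_comm]
  rw [hcomm]

-- ===== VERDICT (by name: the statement is the Claim_ definition above) =====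
theorem assign_msme_clusters_spec : Claim_equal_assign_msme_clusters := by
  unfold Claim_equal_assign_msme_clusters
  intro l _
  unfold Spec_assign_msme_clusters assign_msme_clusters assign_msme_clusters_alt
  trans ((l.filter (fun x => decide (pvClusterOf x = 0))
          ++ l.filter (fun x => decide (pvClusterOf x = 1))
          ++ l.filter (fun x => decide (pvClusterOf x = 2))).foldl
            (fun d k => d.insert k (pvVal l k))
            (PySem.Dict.empty : PySem.Dict Int (Int × List Int))).items
  · apply congrArg PySem.Dict.items
    simp only [PySem.List.enumerate, List.foldl_cons, List.foldl_nil, List.foldl_append,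
      show (0:Int)+1 = 1 from rfl, show (1:Int)+1 = 2 from rfl]
    rw [chunk_fold l 0 (fun acc => decide (acc ≤ 6))
          (fun x => by rw [clusterOf_eq_zero]; simp),
        chunk_fold l 1 (fun acc => decide (7 ≤ acc ∧ acc ≤ 12))
          (fun x => by rw [clusterOf_eq_one]; simp),
        chunk_fold l 2 (fun acc => decide (13 ≤ acc))
          (fun x => by rw [clusterOf_eq_two]; simp)]
  · rw [sorted_clusters]
    exact congrArg PySem.Dict.items
      (foldl_insert_eq_skip _ (pvVal l) _ PySem.Dict.nodup_keys_empty
        (fun k v h => by rw [PySem.Dict.get?_empty] at h; cases h))
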